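-- pv_equiv track=rewrite | github.com/Matan-Hodadov/economic-algo | task4/main.py | create_all_divisions
-- ===== SOURCE A (Python) =====
-- from typing import List
--
-- def create_all_divisions(table: List) -> List:
--     possible_divisions = [[0]*len(table)]
--     for i in range(len(table[0])):
--         column = [row[i] for row in table]
--         new_divisions = []
--         for previously_division in possible_divisions:
--             for j in range(len(column)):
--                 temp = previously_division.copy()
--                 temp[j] += column[j]
--                 new_divisions.append(temp)
--         possible_divisions = new_divisions
--     return possible_divisions
-- ===== SOURCE B (Python) =====
-- def create_all_divisions(table):
--     n = len(table)
--     m = len(table[0])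
--     result = []
--     for k in range(n ** m):
--         div = [0] * n
--         kk = k
--         for i in range(m - 1, -1, -1):
--             j = kk % n
--             kk //= n
--             div[j] += table[j][i]
--         result.append(div)
--     return result
-- ===== Notes on version B (the rewrite author's own statement) =====
-- stated objective: alternative
-- what changed: Instead of rebuilding the whole division list once per column (A's nested flat-map passes), B decodes each index k < n**m as m base-n digits, each digit picking the row that receives that column's value, building every division independently in one pass.
import Mathlib
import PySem

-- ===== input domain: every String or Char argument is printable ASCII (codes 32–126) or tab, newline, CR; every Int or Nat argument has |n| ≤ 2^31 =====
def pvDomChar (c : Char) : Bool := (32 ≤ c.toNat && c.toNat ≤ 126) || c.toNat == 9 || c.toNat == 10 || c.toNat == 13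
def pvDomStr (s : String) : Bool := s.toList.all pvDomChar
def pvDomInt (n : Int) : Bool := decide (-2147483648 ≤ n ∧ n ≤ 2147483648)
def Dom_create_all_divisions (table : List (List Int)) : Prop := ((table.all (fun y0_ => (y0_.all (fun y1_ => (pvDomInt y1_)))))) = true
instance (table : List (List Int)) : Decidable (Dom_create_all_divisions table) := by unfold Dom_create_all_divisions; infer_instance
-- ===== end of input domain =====

-- B replaces A's repeated rebuilding of the division list (one pass per column) by a single
-- pass that decodes each index k < n^m as base-n digits choosing a row per column (objective: alternative).

-- ===== PORT A =====
def create_all_divisions (table : List (List Int)) : List (List Int) :=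
  (List.range (table.headD []).length).foldl
    (fun possible_divisions i =>
      let column := table.map (fun row => row.getD i 0)
      possible_divisions.flatMap (fun prev =>
        (List.range column.length).map (fun j =>
          prev.set j (prev.getD j 0 + column.getD j 0))))
    [List.replicate table.length 0]

-- ===== PORT B =====
-- the inner Python loop 'for i in range(m-1, -1, -1)' is ported as a foldl over (List.range m).reverse
def create_all_divisions_alt (table : List (List Int)) : List (List Int) :=
  let n := table.length
  let m := (table.headD []).length
  (List.range (n ^ m)).map (fun k =>
    ((List.range m).reverse.foldl
      (fun (st : List Int × Nat) i =>
        let j := st.2 % n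
        (st.1.set j (st.1.getD j 0 + (table.getD j []).getD i 0), st.2 / n))
      (List.replicate n 0, k)).1)

-- ===== PRECONDITION & SPEC =====
-- Pre_ excludes exactly the inputs where Python A raises IndexError: the empty table
-- (A indexes table[0]) and tables with a row shorter than table[0] (the column build row[i] raises).
def Pre_create_all_divisions (table : List (List Int)) : Prop :=
  table ≠ [] ∧ ∀ row ∈ table, (table.headD []).length ≤ row.length
instance (table : List (List Int)) : Decidable (Pre_create_all_divisions table) := by
  unfold Pre_create_all_divisions; infer_instance

def pvWitness_create_all_divisions : List (List Int) := [[1, 2], [3, 4]]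

def Spec_create_all_divisions (table : List (List Int)) (out : List (List Int)) : Prop := out = create_all_divisions_alt table
instance (table : List (List Int)) (out : List (List Int)) : Decidable (Spec_create_all_divisions table out) := by unfold Spec_create_all_divisions; infer_instance

-- ===== CLAIM (what is proved, stated in full; the proofs are below) =====
def Claim_equal_create_all_divisions : Prop := ∀ (table : List (List Int)), Dom_create_all_divisions table → Pre_create_all_divisions table → Spec_create_all_divisions table (create_all_divisions table)

-- ===== LEMMAS AND PROOFS =====

-- add c at position j (A's temp[j] += column[j]; B's div[j] += table[j][i])
def pvAddAt (div : List Int) (j : Nat) (c : Int) : List Int :=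
  div.set j (div.getD j 0 + c)

def pvCol (table : List (List Int)) (j i : Nat) : Int := (table.getD j []).getD i 0

def pvStepB (table : List (List Int)) (n : Nat) (st : List Int × Nat) (i : Nat) : List Int × Nat :=
  (pvAddAt st.1 (st.2 % n) (pvCol table (st.2 % n) i), st.2 / n)

def pvFB (table : List (List Int)) (n t : Nat) (st : List Int × Nat) : List Int × Nat :=
  (List.range t).reverse.foldl (pvStepB table n) st

def pvStepA (table : List (List Int)) (n : Nat) (poss : List (List Int)) (i : Nat) : List (List Int) :=
  poss.flatMap (fun prev => (List.range n).map (fun j => pvAddAt prev j (pvCol table j i)))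

def pvSA (table : List (List Int)) (n t : Nat) : List (List Int) :=
  (List.range t).foldl (pvStepA table n) [List.replicate n 0]

theorem pvAddAt_comm (div : List Int) (j j' : Nat) (c c' : Int) :
    pvAddAt (pvAddAt div j c) j' c' = pvAddAt (pvAddAt div j' c') j c := by
  unfold pvAddAt
  by_cases hj : j = j'
  · subst hj
    by_cases h : j < div.length
    · rw [List.set_set, List.set_set]
      have hg : ∀ c0 : Int, (div.set j (div.getD j 0 + c0)).getD j 0 = div.getD j 0 + c0 := by
        intro c0
        simp [List.getD_eq_getElem?_getD, List.getElem?_set_self h]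
      rw [hg, hg]
      have : div.getD j 0 + c + c' = div.getD j 0 + c' + c := by ring
      rw [this]
    · simp [List.set_eq_of_length_le (Nat.le_of_not_lt h)]
  · simp only [List.getD_eq_getElem?_getD, List.getElem?_set_ne hj,
      List.getElem?_set_ne (Ne.symm hj)]
    exact List.set_comm _ _ hj

theorem pvFB_addAt (table : List (List Int)) (n t : Nat) (div : List Int) (kk j : Nat) (c : Int) :
    pvFB table n t (pvAddAt div j c, kk) =
      (pvAddAt (pvFB table n t (div, kk)).1 j c, (pvFB table n t (div, kk)).2) := by
  induction t generalizing div kk with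
  | zero => simp [pvFB]
  | succ t ih =>
    have hr : (List.range (t + 1)).reverse = t :: (List.range t).reverse := by
      simp [List.range_succ]
    simp only [pvFB, hr, List.foldl_cons] at *
    rw [show pvStepB table n (pvAddAt div j c, kk) t =
        (pvAddAt (pvAddAt div (kk % n) (pvCol table (kk % n) t)) j c, kk / n) from by
      simp [pvStepB, pvAddAt_comm]]
    rw [ih]
    simp [pvStepB]

theorem pvRange_mul (a n : Nat) :
    List.range (a * n) = (List.range a).flatMap (fun q => (List.range n).map (fun j => q * n + j)) := by
  induction a with
  | zero => simp
  | succ a ih =>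
    rw [Nat.succ_mul, List.range_add, ih, List.range_succ]
    simp [List.flatMap_append]

theorem pvMain (table : List (List Int)) (n t : Nat) :
    pvSA table n t = (List.range (n ^ t)).map (fun k => (pvFB table n t (List.replicate n 0, k)).1) := by
  induction t with
  | zero => simp [pvSA, pvFB]
  | succ t ih =>
    have hsa : pvSA table n (t + 1) = pvStepA table n (pvSA table n t) t := by
      simp [pvSA, List.range_succ]
    rw [hsa, ih, pow_succ, pvRange_mul]
    unfold pvStepA
    rw [List.flatMap_map]
    rw [List.flatMap_def, List.flatMap_def, List.map_flatten, List.map_map]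
    congr 1
    apply List.map_congr_left
    intro q _
    simp only [Function.comp, List.map_map]
    apply List.map_congr_left
    intro j hj
    have hjn : j < n := List.mem_range.mp hj
    have hn : 0 < n := lt_of_le_of_lt (Nat.zero_le j) hjn
    have hqe : q * n + j = j + q * n := by ring
    have hmod : (q * n + j) % n = j := by
      rw [hqe, Nat.add_mul_mod_self_right, Nat.mod_eq_of_lt hjn]
    have hdiv : (q * n + j) / n = q := by
      rw [hqe, Nat.add_mul_div_right _ _ hn, Nat.div_eq_of_lt hjn]; omega
    have hr : (List.range (t + 1)).reverse = t :: (List.range t).reverse := by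
      simp [List.range_succ]
    show _ = (pvFB table n (t + 1) (List.replicate n 0, q * n + j)).1
    rw [show pvFB table n (t + 1) (List.replicate n 0, q * n + j) =
        pvFB table n t (pvAddAt (List.replicate n 0) j (pvCol table j t), q) from by
      simp [pvFB, hr, pvStepB, hmod, hdiv]]
    rw [pvFB_addAt]

theorem pvGetD_map (table : List (List Int)) (i j : Nat) (hj : j < table.length) :
    (table.map (fun row => row.getD i 0)).getD j 0 = pvCol table j i := by
  simp [List.getD_eq_getElem?_getD, List.getElem?_map, pvCol,
    List.getElem?_eq_getElem hj]

theorem pvA_eq (table : List (List Int)) :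
    create_all_divisions table = pvSA table table.length (table.headD []).length := by
  unfold create_all_divisions pvSA
  congr 1
  funext poss i
  simp only [pvStepA, List.length_map]
  congr 1
  funext prev
  apply List.map_congr_left
  intro j hj
  rw [pvGetD_map table i j (List.mem_range.mp hj)]
  rfl

theorem pvB_eq (table : List (List Int)) :
    create_all_divisions_alt table =
      (List.range (table.length ^ (table.headD []).length)).map
        (fun k => (pvFB table table.length (table.headD []).length (List.replicate table.length 0, k)).1) := by
  rfl

-- ===== VERDICT (by name: the statement is the Claim_ definition above) =====
theorem create_all_divisions_spec : Claim_equal_create_all_divisions := by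
  intro table _ _
  unfold Spec_create_all_divisions
  rw [pvA_eq, pvB_eq, pvMain]
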